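-- pv_equiv track=rewrite | github.com/Belilovsky-Lab/pylo | pylo/optim/AdafacLO_cuda.py | _factored_dims
-- ===== SOURCE A (Python) =====
-- from typing import List, Optional, Tuple, Union
--
-- def _factored_dims(
--     shape: Tuple[int, ...], factored: bool, min_dim_size_to_factor: int
-- ) -> Optional[tuple[int, int]]:
--     """Whether to use a factored second moment estimator.
--
--     This function returns a tuple with the two largest axes to reduce over.
--     If no two dimensions have size >= min_dim_size_to_factor, return None.
--
--     Args:
--       shape: an input shape
--       factored: whether to use factored second-moment estimator for > 2d vars.
--       min_dim_size_to_factor: only factor accumulator if two array dimensions have at least this size.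
--
--     Returns:
--       None or a tuple of ints
--     """
--     if not factored or len(shape) < 2:
--         return None
--     sorted_dims = sorted(((x, i) for i, x in enumerate(shape)))
--     if shape[sorted_dims[-2][1]] < min_dim_size_to_factor:
--         return None
--     return int(sorted_dims[-2][1]), int(sorted_dims[-1][1])
-- ===== SOURCE B (Python) =====
-- from typing import List, Optional, Tuple, Union
--
-- def _factored_dims(
--     shape: Tuple[int, ...], factored: bool, min_dim_size_to_factor: int
-- ) -> Optional[tuple[int, int]]:
--     """Single linear pass keeping the two largest (size, index) pairs,
--     compared as tuples exactly as sorted() would order them."""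
--     if not factored or len(shape) < 2:
--         return None
--     best = None
--     second = None
--     for i, x in enumerate(shape):
--         cand = (x, i)
--         if best is None or cand > best:
--             best, second = cand, best
--         elif second is None or cand > second:
--             second = cand
--     if second[0] < min_dim_size_to_factor:
--         return None
--     return int(second[1]), int(best[1])
-- ===== Notes on version B (the rewrite author's own statement) =====
-- stated objective: faster
-- what changed: Replaces building and sorting the full (size, index) pair list with a single linear scan that maintains the top-two pairs under Python's tuple order, and reads the second-largest size from the kept pair instead of re-indexing shape.
import Mathlib
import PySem

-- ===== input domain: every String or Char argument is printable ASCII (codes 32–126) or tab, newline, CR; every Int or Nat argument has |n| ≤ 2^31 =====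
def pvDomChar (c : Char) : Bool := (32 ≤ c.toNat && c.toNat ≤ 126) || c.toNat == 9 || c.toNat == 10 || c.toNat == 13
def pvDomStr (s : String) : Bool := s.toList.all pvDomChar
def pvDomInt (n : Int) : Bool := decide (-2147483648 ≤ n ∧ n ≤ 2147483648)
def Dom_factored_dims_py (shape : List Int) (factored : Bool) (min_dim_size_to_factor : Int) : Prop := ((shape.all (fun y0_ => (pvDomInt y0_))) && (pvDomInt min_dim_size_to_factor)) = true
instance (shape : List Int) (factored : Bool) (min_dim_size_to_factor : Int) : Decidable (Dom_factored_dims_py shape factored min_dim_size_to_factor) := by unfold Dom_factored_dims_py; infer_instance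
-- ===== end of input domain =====

-- B replaces sort-then-index-twice with one linear top-two scan; objective: faster (O(n) scan instead of sorting).

-- ===== PORT A =====
-- sorted(((x, i) for i, x in enumerate(shape))): build (x, i) pairs, then Python's sorted
-- (tuple comparison = lexicographic; PySem.List.sorted2 with keys fst, snd is exactly that).
def factored_dims_py (shape : List Int) (factored : Bool) (min_dim_size_to_factor : Int) : Option (Int × Int) :=
  if !factored || decide (PySem.List.len shape < 2) then none
  else
    let sorted_dims := PySem.List.sorted2
      ((PySem.List.enumerate shape).map (fun p => (p.2, p.1))) Prod.fst Prod.snd false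
    match PySem.List.pyGet? sorted_dims (-2) with
    | none => none  -- unreachable IndexError: len(shape) ≥ 2 here
    | some p2 =>
      match PySem.List.pyGet? shape p2.2 with
      | none => none  -- unreachable IndexError: p2.2 is a valid index of shape
      | some v =>
        if v < min_dim_size_to_factor then none
        else
          match PySem.List.pyGet? sorted_dims (-1) with
          | none => none  -- unreachable IndexError
          | some p1 => some (p2.2, p1.2)

-- ===== PORT B =====
-- Python tuple comparison cand > best on (Int × Int) pairs
def pvGtPair (a b : Int × Int) : Bool := decide (b.1 < a.1) || (decide (a.1 = b.1) && decide (b.2 < a.2))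

-- one loop iteration of Source B: update (best, second)
def pvTopStep (st : Option (Int × Int) × Option (Int × Int)) (cand : Int × Int) :
    Option (Int × Int) × Option (Int × Int) :=
  match st.1 with
  | none => (some cand, st.1)
  | some b =>
    if pvGtPair cand b then (some cand, some b)
    else
      match st.2 with
      | none => (some b, some cand)
      | some s => if pvGtPair cand s then (some b, some cand) else st

def factored_dims_py_alt (shape : List Int) (factored : Bool) (min_dim_size_to_factor : Int) : Option (Int × Int) :=
  if !factored || decide (PySem.List.len shape < 2) then none
  else
    match (PySem.List.enumerate shape).foldl (fun st p => pvTopStep st (p.2, p.1)) (none, none) with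
    | (some b, some s) =>
        if s.1 < min_dim_size_to_factor then none else some (s.2, b.2)
    | _ => none  -- unreachable: len(shape) ≥ 2 fills both slots

-- ===== PRECONDITION & SPEC =====
def Spec_factored_dims_py (shape : List Int) (factored : Bool) (min_dim_size_to_factor : Int) (out : Option (Int × Int)) : Prop := out = factored_dims_py_alt shape factored min_dim_size_to_factor
instance (shape : List Int) (factored : Bool) (min_dim_size_to_factor : Int) (out : Option (Int × Int)) : Decidable (Spec_factored_dims_py shape factored min_dim_size_to_factor out) := by unfold Spec_factored_dims_py; infer_instance

-- ===== CLAIM (what is proved, stated in full; the proofs are below) =====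
def Claim_equal_factored_dims_py : Prop := ∀ (shape : List Int) (factored : Bool) (min_dim_size_to_factor : Int), Dom_factored_dims_py shape factored min_dim_size_to_factor → Spec_factored_dims_py shape factored min_dim_size_to_factor (factored_dims_py shape factored min_dim_size_to_factor)

-- ===== LEMMAS AND PROOFS =====

-- lexicographic strict order on pairs (Python tuple <)
def pvLtP (a b : Int × Int) : Prop := a.1 < b.1 ∨ (a.1 = b.1 ∧ a.2 < b.2)

-- sorted2's "before" test with keys fst/snd
def pvBf (a b : Int × Int) : Bool :=
  decide (a.1 < b.1) || (!decide (b.1 < a.1) && decide (a.2 < b.2))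

theorem pvLtP_trans {a b c : Int × Int} (h1 : pvLtP a b) (h2 : pvLtP b c) : pvLtP a c := by
  unfold pvLtP at *; omega

-- when the candidate's index is strictly larger, tuple comparisons reduce to the sizes
theorem pvGt_snd (c y : Int × Int) (h : y.2 < c.2) : pvGtPair c y = decide (y.1 ≤ c.1) := by
  rw [Bool.eq_iff_iff]
  simp only [pvGtPair, Bool.or_eq_true, Bool.and_eq_true, decide_eq_true_eq]
  omega

theorem pvBf_snd (c y : Int × Int) (h : y.2 < c.2) : pvBf c y = decide (c.1 < y.1) := by
  rw [Bool.eq_iff_iff]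
  simp only [pvBf, Bool.or_eq_true, Bool.and_eq_true, Bool.not_eq_true', decide_eq_true_eq,
    decide_eq_false_iff_not]
  omega

-- the invariant tying A's insertion-sort accumulator to B's (best, second) state
def pvInv (acc : List (Int × Int)) (st : Option (Int × Int) × Option (Int × Int)) : Prop :=
  (st = (none, none) ∧ acc = [])
  ∨ (∃ b, st = (some b, none) ∧ acc = [b])
  ∨ (∃ b s rest, st = (some b, some s) ∧ acc = rest ++ [s, b] ∧ acc.Pairwise pvLtP)

theorem pv_sorted2_eq_foldl (xs : List (Int × Int)) :
    PySem.List.sorted2 xs Prod.fst Prod.snd false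
      = xs.foldl (fun acc x => PySem.List.insertBy pvBf x acc) [] := rfl

theorem pv_insertBy_cons_pos (c y : Int × Int) (ys : List (Int × Int)) (h : pvBf c y = true) :
    PySem.List.insertBy pvBf c (y :: ys) = c :: y :: ys := by
  simp [PySem.List.insertBy, h]

theorem pv_insertBy_cons_neg (c y : Int × Int) (ys : List (Int × Int)) (h : pvBf c y = false) :
    PySem.List.insertBy pvBf c (y :: ys) = y :: PySem.List.insertBy pvBf c ys := by
  simp [PySem.List.insertBy, h]

theorem pv_insertBy_split (c : Int × Int) (l1 l2 : List (Int × Int))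
    (h : ∀ y ∈ l1, pvBf c y = false) :
    PySem.List.insertBy pvBf c (l1 ++ l2) = l1 ++ PySem.List.insertBy pvBf c l2 := by
  induction l1 with
  | nil => rfl
  | cons y ys ih =>
    rw [List.cons_append, pv_insertBy_cons_neg c y _ (h y (by simp)), List.cons_append,
      ih (fun z hz => h z (by simp [hz]))]

theorem pv_insertBy_pairwise (c : Int × Int) (acc : List (Int × Int))
    (hp : acc.Pairwise pvLtP) (hlt : ∀ y ∈ acc, y.2 < c.2) :
    (PySem.List.insertBy pvBf c acc).Pairwise pvLtP := by
  induction acc with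
  | nil => simp [PySem.List.insertBy]
  | cons y ys ih =>
    rcases List.pairwise_cons.mp hp with ⟨hy, hys⟩
    have hy2 : y.2 < c.2 := hlt y (by simp)
    by_cases hb : pvBf c y = true
    · rw [pv_insertBy_cons_pos c y ys hb]
      have hcy : pvLtP c y := by
        rw [pvBf_snd c y hy2] at hb
        unfold pvLtP; simp only [decide_eq_true_eq] at hb; omega
      refine List.pairwise_cons.mpr ⟨?_, hp⟩
      intro z hz
      rcases List.mem_cons.mp hz with rfl | hz
      · exact hcy
      · exact pvLtP_trans hcy (hy z hz)
    · rw [pv_insertBy_cons_neg c y ys (by simpa using hb)]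
      refine List.pairwise_cons.mpr ⟨?_, ih hys (fun z hz => hlt z (by simp [hz]))⟩
      intro z hz
      rcases (PySem.List.insertBy_mem_iff _ _ _ _).mp hz with hzc | hz
      · rw [hzc]
        rw [pvBf_snd c y hy2] at hb
        unfold pvLtP; simp only [decide_eq_true_eq] at hb; omega
      · exact hy z hz

theorem pv_insertBy_keep (c s : Int × Int) (t l : List (Int × Int)) (h : pvBf c s = true) :
    ∃ l', PySem.List.insertBy pvBf c (l ++ s :: t) = l' ++ s :: t := by
  induction l with
  | nil => exact ⟨[c], by rw [List.nil_append, pv_insertBy_cons_pos c s t h]; rfl⟩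
  | cons y ys ih =>
    by_cases hb : pvBf c y = true
    · exact ⟨c :: y :: ys, by rw [List.cons_append, pv_insertBy_cons_pos c y _ hb]; simp⟩
    · rcases ih with ⟨l', hl'⟩
      exact ⟨y :: l', by rw [List.cons_append, pv_insertBy_cons_neg c y _ (by simpa using hb), hl']; simp⟩

-- one step preserves the invariant
theorem pv_step (acc : List (Int × Int)) (st : Option (Int × Int) × Option (Int × Int))
    (c : Int × Int) (hInv : pvInv acc st) (hlt : ∀ y ∈ acc, y.2 < c.2) :
    pvInv (PySem.List.insertBy pvBf c acc) (pvTopStep st c) := by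
  rcases hInv with ⟨hst, rfl⟩ | ⟨b, hst, rfl⟩ | ⟨b, s, rest, hst, hacc, hpw⟩
  · subst hst
    exact Or.inr (Or.inl ⟨c, rfl, rfl⟩)
  · subst hst
    have hb2 : b.2 < c.2 := hlt b (by simp)
    by_cases hgb : pvGtPair c b = true
    · have hble : b.1 ≤ c.1 := by rw [pvGt_snd c b hb2] at hgb; simpa using hgb
      have hbf : pvBf c b = false := by rw [pvBf_snd c b hb2]; simp; omega
      refine Or.inr (Or.inr ⟨c, b, [], by simp [pvTopStep, hgb], ?_, ?_⟩)
      · rw [show ([b] : List (Int × Int)) = b :: [] from rfl, pv_insertBy_cons_neg c b [] hbf]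
        rfl
      · rw [show ([b] : List (Int × Int)) = b :: [] from rfl, pv_insertBy_cons_neg c b [] hbf]
        simp [List.pairwise_cons, PySem.List.insertBy]
        unfold pvLtP; omega
    · have hc1 : c.1 < b.1 := by rw [pvGt_snd c b hb2] at hgb; simpa using hgb
      have hbf : pvBf c b = true := by rw [pvBf_snd c b hb2]; simpa using hc1
      refine Or.inr (Or.inr ⟨b, c, [], by simp [pvTopStep, hgb], ?_, ?_⟩)
      · rw [show ([b] : List (Int × Int)) = b :: [] from rfl, pv_insertBy_cons_pos c b [] hbf]
        rfl
      · rw [show ([b] : List (Int × Int)) = b :: [] from rfl, pv_insertBy_cons_pos c b [] hbf]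
        simp [List.pairwise_cons]
        unfold pvLtP; omega
  · subst hst; subst hacc
    have hb2 : b.2 < c.2 := hlt b (by simp)
    have hs2 : s.2 < c.2 := hlt s (by simp)
    have hpw' := pv_insertBy_pairwise c _ hpw hlt
    rcases List.pairwise_append.mp hpw with ⟨hpr, hpsb, hcross⟩
    have hsb : pvLtP s b := by
      rcases List.pairwise_cons.mp hpsb with ⟨h1, _⟩; exact h1 b (by simp)
    by_cases hgb : pvGtPair c b = true
    · -- new maximum: c appended at the end
      have hble : b.1 ≤ c.1 := by rw [pvGt_snd c b hb2] at hgb; simpa using hgb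
      have hall : ∀ y ∈ rest ++ [s, b], pvBf c y = false := by
        intro y hy
        have hy2 : y.2 < c.2 := hlt y hy
        rw [pvBf_snd c y hy2]
        have hyb : y.1 ≤ b.1 := by
          rcases List.mem_append.mp hy with h1 | h1
          · have := hcross y h1 b (by simp); unfold pvLtP at this; omega
          · rcases List.mem_cons.mp h1 with rfl | h1
            · unfold pvLtP at hsb; omega
            · rcases List.mem_cons.mp h1 with rfl | h1
              · omega
              · simp at h1
        simp; omega
      have heq := PySem.List.insertBy_of_forall_not_before pvBf c _ hall
      rw [heq] at hpw' ⊢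
      refine Or.inr (Or.inr ⟨c, b, rest ++ [s], by simp [pvTopStep, hgb], by simp, hpw'⟩)
    · have hc1b : c.1 < b.1 := by rw [pvGt_snd c b hb2] at hgb; simpa using hgb
      have hbfb : pvBf c b = true := by rw [pvBf_snd c b hb2]; simpa using hc1b
      by_cases hgs : pvGtPair c s = true
      · -- new second maximum: c inserted just before b
        have hsle : s.1 ≤ c.1 := by rw [pvGt_snd c s hs2] at hgs; simpa using hgs
        have hall : ∀ y ∈ rest ++ [s], pvBf c y = false := by
          intro y hy
          have hy2 : y.2 < c.2 := hlt y (by simp only [List.mem_append, List.mem_cons] at hy ⊢; tauto)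
          rw [pvBf_snd c y hy2]
          have hys : y.1 ≤ s.1 := by
            rcases List.mem_append.mp hy with h1 | h1
            · have := hcross y h1 s (by simp); unfold pvLtP at this; omega
            · rcases List.mem_cons.mp h1 with rfl | h1
              · omega
              · simp at h1
          simp; omega
        have heq : PySem.List.insertBy pvBf c (rest ++ [s, b]) = (rest ++ [s]) ++ [c, b] := by
          rw [show rest ++ [s, b] = (rest ++ [s]) ++ [b] from by simp,
            pv_insertBy_split c (rest ++ [s]) [b] hall,
            show ([b] : List (Int × Int)) = b :: [] from rfl,
            pv_insertBy_cons_pos c b [] hbfb]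
        rw [heq] at hpw' ⊢
        exact Or.inr (Or.inr ⟨b, c, rest ++ [s], by simp [pvTopStep, hgb, hgs], rfl, hpw'⟩)
      · -- c below both: state and last two positions unchanged
        have hc1s : c.1 < s.1 := by rw [pvGt_snd c s hs2] at hgs; simpa using hgs
        have hbfs : pvBf c s = true := by rw [pvBf_snd c s hs2]; simpa using hc1s
        rcases pv_insertBy_keep c s [b] rest hbfs with ⟨l', hl'⟩
        rw [hl'] at hpw' ⊢
        exact Or.inr (Or.inr ⟨b, s, l', by simp [pvTopStep, hgb, hgs], rfl, hpw'⟩)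

-- B's fold together with A's insertion fold over the same enumerate list
theorem pv_fold (l : List Int) (k : Int) (acc : List (Int × Int))
    (st : Option (Int × Int) × Option (Int × Int))
    (hInv : pvInv acc st) (hlt : ∀ y ∈ acc, y.2 < k) :
    pvInv (((PySem.List.enumerate l k).map (fun p => (p.2, p.1))).foldl
            (fun a x => PySem.List.insertBy pvBf x a) acc)
          ((PySem.List.enumerate l k).foldl (fun s p => pvTopStep s (p.2, p.1)) st) := by
  induction l generalizing k acc st with
  | nil => simpa [PySem.List.enumerate_nil]
  | cons x xs ih =>
    rw [PySem.List.enumerate_cons]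
    simp only [List.map_cons, List.foldl_cons]
    refine ih (k + 1) _ _ (pv_step acc st (x, k) hInv hlt) ?_
    intro y hy
    rcases (PySem.List.insertBy_mem_iff _ _ _ _).mp hy with rfl | hy
    · omega
    · have := hlt y hy; omega

-- ===== VERDICT (by name: the statement is the Claim_ definition above) =====
theorem factored_dims_py_spec : Claim_equal_factored_dims_py := by
  unfold Claim_equal_factored_dims_py
  intro shape factored m _
  unfold Spec_factored_dims_py factored_dims_py factored_dims_py_alt
  cases hB : (!factored || decide (PySem.List.len shape < 2)) with
  | true => simp
  | false =>
    simp only [Bool.false_eq_true, if_false]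
    have hlen : 2 ≤ shape.length := by
      simp only [Bool.or_eq_false_iff, decide_eq_false_iff_not, PySem.List.len_eq, not_lt] at hB
      omega
    have key := pv_fold shape 0 [] (none, none) (Or.inl ⟨rfl, rfl⟩) (by simp)
    have hlenacc :
        (((PySem.List.enumerate shape 0).map (fun p => (p.2, p.1))).foldl
          (fun a x => PySem.List.insertBy pvBf x a) []).length = shape.length := by
      rw [← pv_sorted2_eq_foldl]
      simpa [PySem.List.length_enumerate] using
        (PySem.List.sorted2_perm ((PySem.List.enumerate shape 0).map (fun p => (p.2, p.1)))
          Prod.fst Prod.snd false).length_eq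
    rcases key with ⟨_, h2⟩ | ⟨b, _, h2⟩ | ⟨b, s, rest, hst, hacc, _⟩
    · rw [h2] at hlenacc; simp at hlenacc; omega
    · rw [h2] at hlenacc; simp at hlenacc; omega
    · -- identify sorted_dims with rest ++ [s, b]
      have hS : PySem.List.sorted2 ((PySem.List.enumerate shape 0).map (fun p => (p.2, p.1)))
          Prod.fst Prod.snd false = rest ++ [s, b] := (pv_sorted2_eq_foldl _).trans hacc
      have hlenr : (rest ++ [s, b]).length = shape.length := by rw [hacc] at hlenacc; exact hlenacc
      have h2get : PySem.List.pyGet? (rest ++ [s, b]) (-2) = some s := by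
        rw [PySem.List.pyGet?_neg_ofNat _ 2 (by omega) (by simp)]
        have : (rest ++ [s, b]).length - 2 = rest.length := by simp
        rw [this, List.getElem?_append_right (le_refl _)]
        simp
      have h1get : PySem.List.pyGet? (rest ++ [s, b]) (-1) = some b := by
        rw [show rest ++ [s, b] = (rest ++ [s]) ++ [b] from by simp,
          PySem.List.pyGet?_neg_one_append_singleton]
      have hsget : PySem.List.pyGet? shape s.2 = some s.1 := by
        have hmem : s ∈ rest ++ [s, b] := by simp
        rw [← hacc, ← pv_sorted2_eq_foldl] at hmem
        have hmem2 := (PySem.List.sorted2_perm _ Prod.fst Prod.snd false).mem_iff.mp hmem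
        rcases List.mem_map.mp hmem2 with ⟨p, hp, hps⟩
        rcases (PySem.List.mem_enumerate_iff shape 0 p).mp hp with ⟨j, hj, rfl⟩
        have h1 : s.2 = (j : Int) := by rw [← hps]; simp
        have h2 : s.1 = shape[j] := by rw [← hps]
        rw [h1, PySem.List.pyGet?_natCast, List.getElem?_eq_getElem hj, h2]
      simp only [hS, hst, h2get, h1get, hsget]
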